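-- pv_equiv track=rewrite | github.com/Th3X-Zohir/ecomai | scripts/minimax_auth_proxy.py | _strip_think_block_text
-- ===== SOURCE A (Python) =====
-- def _strip_think_block_text(text: str) -> str:
--     # Remove <think>...</think> blocks from plain text responses.
--     out: list[str] = []
--     i = 0
--     while i < len(text):
--         open_idx = text.find("<think>", i)
--         if open_idx == -1:
--             out.append(text[i:])
--             break
--
--         out.append(text[i:open_idx])
--         close_idx = text.find("</think>", open_idx + len("<think>"))
--         if close_idx == -1:
--             break
--
--         i = close_idx + len("</think>")
--
--     return "".join(out)
-- ===== SOURCE B (Python) =====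
-- def _strip_think_block_text(text: str) -> str:
--     # Single left-to-right scan with an inside/outside state flag:
--     # outside a block, characters are kept; "<think>" flips to inside;
--     # inside, characters are dropped until "</think>" flips back outside
--     # (an unclosed block drops everything to the end of the text).
--     out: list[str] = []
--     i = 0
--     inside = False
--     while i < len(text):
--         if inside:
--             if text.startswith("</think>", i):
--                 inside = False
--                 i += len("</think>")
--             else:
--                 i += 1
--         else:
--             if text.startswith("<think>", i):
--                 inside = True
--                 i += len("<think>")
--             else:
--                 out.append(text[i])
--                 i += 1
--     return "".join(out)
-- ===== Notes on version B (the rewrite author's own statement) =====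
-- stated objective: alternative
-- what changed: Replaces A's find/slice jump loop (repeated substring searches plus slice appends) with a single character-by-character scan driven by an inside/outside state flag, like a small state machine.
import Mathlib
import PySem

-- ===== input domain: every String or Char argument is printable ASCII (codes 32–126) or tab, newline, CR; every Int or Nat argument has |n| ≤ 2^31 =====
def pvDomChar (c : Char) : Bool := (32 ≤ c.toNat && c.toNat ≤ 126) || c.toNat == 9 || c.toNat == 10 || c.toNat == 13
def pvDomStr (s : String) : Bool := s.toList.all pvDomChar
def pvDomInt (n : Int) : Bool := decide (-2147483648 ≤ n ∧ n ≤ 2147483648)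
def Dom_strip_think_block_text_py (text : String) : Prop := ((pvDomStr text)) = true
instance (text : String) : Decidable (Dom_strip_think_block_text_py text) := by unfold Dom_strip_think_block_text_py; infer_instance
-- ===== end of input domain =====

-- B replaces A's find/slice jump loop with a single character-by-character scan
-- driven by an inside/outside state flag (objective: alternative, same behaviour).

-- ===== PORT A =====
-- A's while-loop: out accumulates string pieces, i is the cursor; the fuel argument
-- (text.length + 1) only makes the recursion total — i strictly increases each pass.
def stripALoop (text : List Char) (fuel : Nat) (i : Nat) (out : List (List Char)) : List (List Char) :=
  match fuel with
  | 0 => out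
  | Nat.succ fuel =>
    if i < text.length then
      let openIdx := PySem.Chars.findFrom text "<think>".toList (i : Int)
      if openIdx = -1 then out ++ [PySem.List.slice text (some (i : Int)) none]
      else
        let out' := out ++ [PySem.List.slice text (some (i : Int)) (some openIdx)]
        let closeIdx := PySem.Chars.findFrom text "</think>".toList (openIdx + 7)
        if closeIdx = -1 then out'
        else stripALoop text fuel (closeIdx + 8).toNat out'
    else out

def strip_think_block_text_py (text : String) : String :=
  String.ofList (PySem.Chars.join [] (stripALoop text.toList (text.toList.length + 1) 0 []))

-- ===== PORT B =====
-- B's scan: outside (inside = false) keep the char unless "<think>" starts here;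
-- inside (inside = true) drop chars until "</think>" starts here.
def stripBGo : List Char → Bool → List Char
  | [], _ => []
  | c :: rest, true =>
      if PySem.Chars.startswith (c :: rest) "</think>".toList then stripBGo (rest.drop 7) false
      else stripBGo rest true
  | c :: rest, false =>
      if PySem.Chars.startswith (c :: rest) "<think>".toList then stripBGo (rest.drop 6) true
      else c :: stripBGo rest false
termination_by l _ => l.length
decreasing_by all_goals simp

def strip_think_block_text_py_alt (text : String) : String :=
  String.ofList (stripBGo text.toList false)

-- ===== PRECONDITION & SPEC =====
def Spec_strip_think_block_text_py (text : String) (out : String) : Prop := out = strip_think_block_text_py_alt text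
instance (text : String) (out : String) : Decidable (Spec_strip_think_block_text_py text out) := by unfold Spec_strip_think_block_text_py; infer_instance

-- ===== CLAIM (what is proved, stated in full; the proofs are below) =====
def Claim_equal_strip_think_block_text_py : Prop := ∀ (text : String), Dom_strip_think_block_text_py text → Spec_strip_think_block_text_py text (strip_think_block_text_py text)

-- ===== LEMMAS AND PROOFS =====

lemma pvJoinNilFlatten (l : List (List Char)) : PySem.Chars.join [] l = l.flatten := by
  induction l with
  | nil => simp [PySem.Chars.join, List.intercalate]
  | cons a l ih =>
    cases l with
    | nil => simp [PySem.Chars.join, List.intercalate, List.intersperse]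
    | cons b l =>
      simp only [PySem.Chars.join] at ih ⊢
      simp [List.intercalate, List.intersperse] at ih ⊢
      simpa using ih

-- B's scan on a string with no "<think>" (outside state): everything is kept.
lemma pvBgoNoOpen (s : List Char) (h : ¬ ("<think>".toList <:+: s)) : stripBGo s false = s := by
  induction s with
  | nil => simp [stripBGo]
  | cons c rest ih =>
    have hns : PySem.Chars.startswith (c :: rest) "<think>".toList = false := by
      rw [Bool.eq_false_iff]
      intro hsw
      exact h ((PySem.Chars.startswith_iff _ _).1 hsw).isInfix
    rw [stripBGo, hns]
    simp only [Bool.false_eq_true, if_false]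
    rw [ih (fun hinf => h (hinf.trans (List.suffix_cons c rest).isInfix))]

-- B's scan when the first "<think>" starts at index k (outside state).
lemma pvBgoOpen (s : List Char) : ∀ k : Nat, ("<think>".toList <+: s.drop k) →
    (∀ j, j < k → ¬ ("<think>".toList <+: s.drop j)) →
    stripBGo s false = s.take k ++ stripBGo (s.drop (k + 7)) true := by
  induction s with
  | nil =>
    intro k hp _
    simp only [List.drop_nil] at hp
    simp at hp
  | cons c rest ih =>
    intro k hp hmin
    cases k with
    | zero =>
      have hsw : PySem.Chars.startswith (c :: rest) "<think>".toList = true :=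
        (PySem.Chars.startswith_iff _ _).2 (by simpa using hp)
      rw [stripBGo, hsw]
      simp
    | succ k =>
      have hns : PySem.Chars.startswith (c :: rest) "<think>".toList = false := by
        rw [Bool.eq_false_iff]
        intro hsw
        exact hmin 0 (Nat.succ_pos _) (by simpa using (PySem.Chars.startswith_iff _ _).1 hsw)
      rw [stripBGo, hns]
      simp only [Bool.false_eq_true, if_false]
      rw [ih k (by simpa using hp) (fun j hj => by simpa using hmin (j + 1) (by omega))]
      have h78 : k + 1 + 7 = (k + 7) + 1 := by omega
      rw [h78]
      simp [List.take_succ_cons, List.drop_succ_cons]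

-- B's scan on a string with no "</think>" (inside state): everything is dropped.
lemma pvBgoNoClose (s : List Char) (h : ¬ ("</think>".toList <:+: s)) : stripBGo s true = [] := by
  induction s with
  | nil => simp [stripBGo]
  | cons c rest ih =>
    have hns : PySem.Chars.startswith (c :: rest) "</think>".toList = false := by
      rw [Bool.eq_false_iff]
      intro hsw
      exact h ((PySem.Chars.startswith_iff _ _).1 hsw).isInfix
    rw [stripBGo, hns]
    simp only [Bool.false_eq_true, if_false]
    exact ih (fun hinf => h (hinf.trans (List.suffix_cons c rest).isInfix))

-- B's scan when the first "</think>" starts at index k (inside state).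
lemma pvBgoClose (s : List Char) : ∀ k : Nat, ("</think>".toList <+: s.drop k) →
    (∀ j, j < k → ¬ ("</think>".toList <+: s.drop j)) →
    stripBGo s true = stripBGo (s.drop (k + 8)) false := by
  induction s with
  | nil =>
    intro k hp _
    simp only [List.drop_nil] at hp
    simp at hp
  | cons c rest ih =>
    intro k hp hmin
    cases k with
    | zero =>
      have hsw : PySem.Chars.startswith (c :: rest) "</think>".toList = true :=
        (PySem.Chars.startswith_iff _ _).2 (by simpa using hp)
      rw [stripBGo, hsw]
      simp
    | succ k =>
      have hns : PySem.Chars.startswith (c :: rest) "</think>".toList = false := by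
        rw [Bool.eq_false_iff]
        intro hsw
        exact hmin 0 (Nat.succ_pos _) (by simpa using (PySem.Chars.startswith_iff _ _).1 hsw)
      rw [stripBGo, hns]
      simp only [Bool.false_eq_true, if_false]
      rw [ih k (by simpa using hp) (fun j hj => by simpa using hmin (j + 1) (by omega))]
      have h78 : k + 1 + 8 = (k + 8) + 1 := by omega
      rw [h78, List.drop_succ_cons]

-- The core invariant: A's loop from cursor i joins to out plus B's scan of the suffix.
lemma pvMain (fuel : Nat) : ∀ (text : List Char) (i : Nat) (out : List (List Char)),
    text.length + 1 ≤ fuel + i →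
    PySem.Chars.join [] (stripALoop text fuel i out) =
      PySem.Chars.join [] out ++ stripBGo (text.drop i) false := by
  induction fuel with
  | zero =>
    intro text i out hfuel
    rw [stripALoop]
    rw [List.drop_eq_nil_of_le (by omega)]
    simp [stripBGo]
  | succ fuel ih =>
    intro text i out hfuel
    rw [stripALoop]
    by_cases hi : i < text.length
    · have hile : i ≤ text.length := le_of_lt hi
      rw [if_pos hi]
      simp only []
      rw [PySem.Chars.findFrom_natCast text _ i hile]
      by_cases hf1 : PySem.Chars.find (text.drop i) "<think>".toList = -1
      · rw [if_pos (by rw [if_pos hf1])]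
        rw [pvJoinNilFlatten, pvJoinNilFlatten]
        rw [PySem.List.slice_from_natCast]
        rw [pvBgoNoOpen _ ((PySem.Chars.find_eq_neg_one_iff _ _).1 hf1)]
        simp
      · have hge1 := PySem.Chars.neg_one_le_find (text.drop i) "<think>".toList
        have h01 : 0 ≤ PySem.Chars.find (text.drop i) "<think>".toList := by omega
        rw [if_neg hf1]
        rw [if_neg (by omega : ¬((i : Int) + PySem.Chars.find (List.drop i text) "<think>".toList = -1))]
        have spec1 := PySem.Chars.find_spec (s := text.drop i) (sub := "<think>".toList) h01
        have hlen7 : ("<think>".toList).length = 7 := by decide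
        have hdlen := spec1.1.length_le
        rw [hlen7, List.length_drop, List.length_drop] at hdlen
        -- name the first find
        set f1 : Int := PySem.Chars.find (text.drop i) "<think>".toList with hf1def
        have hf1n : f1 = (f1.toNat : Int) := by omega
        have hk1 : i + f1.toNat + 7 ≤ text.length := by omega
        have hcast : (i : Int) + f1 + 7 = ((i + f1.toNat + 7 : Nat) : Int) := by
          push_cast; omega
        rw [hcast, PySem.Chars.findFrom_natCast text _ (i + f1.toNat + 7) hk1]
        have hdd1 : (text.drop i).drop (f1.toNat + 7) = text.drop (i + f1.toNat + 7) := by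
          rw [List.drop_drop]; congr 1
        have hBopen : stripBGo (text.drop i) false =
            (text.drop i).take f1.toNat ++ stripBGo (text.drop (i + f1.toNat + 7)) true := by
          rw [pvBgoOpen (text.drop i) f1.toNat spec1.1 spec1.2, hdd1]
        have hslice : PySem.List.slice text (some (i : Int)) (some ((i : Int) + f1)) =
            (text.drop i).take f1.toNat := by
          rw [show ((i : Int) + f1) = ((i : Int) + (f1.toNat : Int)) from by omega]
          exact PySem.List.slice_natCast_add text i f1.toNat
        by_cases hf2 : PySem.Chars.find (text.drop (i + f1.toNat + 7)) "</think>".toList = -1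
        · rw [if_pos (by rw [if_pos hf2])]
          rw [pvJoinNilFlatten, pvJoinNilFlatten]
          rw [hslice, hBopen]
          rw [pvBgoNoClose _ ((PySem.Chars.find_eq_neg_one_iff _ _).1 hf2)]
          simp
        · have hge2 := PySem.Chars.neg_one_le_find (text.drop (i + f1.toNat + 7)) "</think>".toList
          have h02 : 0 ≤ PySem.Chars.find (text.drop (i + f1.toNat + 7)) "</think>".toList := by omega
          rw [if_neg hf2]
          rw [if_neg (by omega : ¬(((i + f1.toNat + 7 : Nat) : Int) + PySem.Chars.find (List.drop (i + f1.toNat + 7) text) "</think>".toList = -1))]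
          have spec2 := PySem.Chars.find_spec (s := text.drop (i + f1.toNat + 7))
            (sub := "</think>".toList) h02
          have hlen8 : ("</think>".toList).length = 8 := by decide
          have hdlen2 := spec2.1.length_le
          rw [hlen8, List.length_drop, List.length_drop] at hdlen2
          set f2 : Int := PySem.Chars.find (text.drop (i + f1.toNat + 7)) "</think>".toList with hf2def
          have hf2n : f2 = (f2.toNat : Int) := by omega
          have hidx : (((i + f1.toNat + 7 : Nat) : Int) + f2 + 8).toNat
              = i + f1.toNat + 7 + f2.toNat + 8 := by omega
          rw [hidx]
          rw [ih text (i + f1.toNat + 7 + f2.toNat + 8) _ (by omega)]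
          rw [pvJoinNilFlatten, pvJoinNilFlatten]
          have hdd2 : (text.drop (i + f1.toNat + 7)).drop (f2.toNat + 8)
              = text.drop (i + f1.toNat + 7 + f2.toNat + 8) := by
            rw [List.drop_drop]; congr 1
          have hBclose : stripBGo (text.drop (i + f1.toNat + 7)) true =
              stripBGo (text.drop (i + f1.toNat + 7 + f2.toNat + 8)) false := by
            rw [pvBgoClose (text.drop (i + f1.toNat + 7)) f2.toNat spec2.1 spec2.2, hdd2]
          rw [hBopen, hBclose, hslice]
          simp
    · rw [if_neg hi]
      rw [List.drop_eq_nil_of_le (by omega)]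
      simp [stripBGo]

-- ===== VERDICT (by name: the statement is the Claim_ definition above) =====
theorem strip_think_block_text_py_spec : Claim_equal_strip_think_block_text_py := by
  intro text _
  unfold Spec_strip_think_block_text_py strip_think_block_text_py strip_think_block_text_py_alt
  congr 1
  rw [pvMain (text.toList.length + 1) text.toList 0 [] (by omega)]
  rw [pvJoinNilFlatten]
  simp
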